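-- pv_equiv track=rewrite | github.com/schependom/synthology | apps/udm_baseline/src/udm_baseline/exp2_parity_report.py | _bucketize_hops
-- ===== SOURCE A (Python) =====
-- def _bucketize_hops(hop_histogram: dict[str, int], min_deep_hops: int) -> dict[str, int]:
--     hop0 = 0
--     hop1 = 0
--     hop2_to_3 = 0
--     deep = 0
--
--     for hop_key, count in hop_histogram.items():
--         hop = _to_int(hop_key, default=0)
--         c = _to_int(count, default=0)
--         if hop == 0:
--             hop0 += c
--         elif hop == 1:
--             hop1 += c
--         elif 2 <= hop <= 3:
--             hop2_to_3 += c
--         if hop >= min_deep_hops: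
--             deep += c
--
--     return {
--         "hop_0": hop0,
--         "hop_1": hop1,
--         "hop_2_to_3": hop2_to_3,
--         "hop_ge_min_deep": deep,
--     }
--
-- def _to_int(value: str | int | None, default: int = 0) -> int:
--     if value is None:
--         return default
--     try:
--         return int(value)
--     except (TypeError, ValueError):
--         return default
-- ===== SOURCE B (Python) =====
-- def _to_int(value, default=0):
--     if value is None:
--         return default
--     try:
--         return int(value)
--     except (TypeError, ValueError):
--         return default
--
--
-- def _bucketize_hops(hop_histogram, min_deep_hops):
--     # Build an aggregate table keyed by the parsed integer hop value, then
--     # answer each bucket from the table.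
--     agg = {}
--     for hop_key, count in hop_histogram.items():
--         h = _to_int(hop_key, default=0)
--         agg[h] = agg.get(h, 0) + _to_int(count, default=0)
--     return {
--         "hop_0": agg.get(0, 0),
--         "hop_1": agg.get(1, 0),
--         "hop_2_to_3": agg.get(2, 0) + agg.get(3, 0),
--         "hop_ge_min_deep": sum(c for h, c in agg.items() if h >= min_deep_hops),
--     }
-- ===== Notes on version B (the rewrite author's own statement) =====
-- stated objective: alternative
-- what changed: A's fused single scan holding four running counters is replaced by building an aggregate dict keyed by the parsed integer hop value (merging distinct string keys that parse to the same int) and then answering the four buckets by table lookups plus one filtered sum over the aggregate's items.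
import Mathlib
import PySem

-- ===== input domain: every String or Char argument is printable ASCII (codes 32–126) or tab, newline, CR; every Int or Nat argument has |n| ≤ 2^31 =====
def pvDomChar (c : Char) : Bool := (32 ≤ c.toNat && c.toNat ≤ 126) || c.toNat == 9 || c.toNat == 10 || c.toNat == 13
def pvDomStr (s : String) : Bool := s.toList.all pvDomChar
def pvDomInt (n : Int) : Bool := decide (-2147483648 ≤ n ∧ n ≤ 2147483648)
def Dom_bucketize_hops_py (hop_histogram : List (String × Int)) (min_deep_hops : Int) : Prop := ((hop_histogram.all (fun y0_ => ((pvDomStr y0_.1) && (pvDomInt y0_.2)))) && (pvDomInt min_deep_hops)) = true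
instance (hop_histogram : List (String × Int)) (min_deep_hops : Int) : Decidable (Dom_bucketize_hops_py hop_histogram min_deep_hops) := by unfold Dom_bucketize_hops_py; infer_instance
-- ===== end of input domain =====

-- B replaces A's fused four-counter scan by building an aggregate dict keyed by the
-- parsed hop value and answering the four buckets from that table (objective: alternative).

-- ===== PORT A =====
-- _to_int(value, default=0) applied to a str key: int(s) or default on ValueError.
-- (applied to the int count it is the identity, so the ports use p.2 directly)
def toIntDefault (s : String) : Int := (PySem.Int.ofStr? s).getD 0

-- the body of A's for-loop: the elif cascade over the four counters
def stepA (min_deep_hops : Int) (acc : Int × Int × Int × Int) (p : String × Int) :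
    Int × Int × Int × Int :=
  let hop := toIntDefault p.1
  let c := p.2
  let acc2 :=
    if hop = 0 then (acc.1 + c, acc.2.1, acc.2.2.1, acc.2.2.2)
    else if hop = 1 then (acc.1, acc.2.1 + c, acc.2.2.1, acc.2.2.2)
    else if 2 ≤ hop ∧ hop ≤ 3 then (acc.1, acc.2.1, acc.2.2.1 + c, acc.2.2.2)
    else acc
  if min_deep_hops ≤ hop then (acc2.1, acc2.2.1, acc2.2.2.1, acc2.2.2.2 + c) else acc2

def bucketize_hops_py (hop_histogram : List (String × Int)) (min_deep_hops : Int) :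
    List (String × Int) :=
  let r := hop_histogram.foldl (stepA min_deep_hops) (0, 0, 0, 0)
  [("hop_0", r.1), ("hop_1", r.2.1), ("hop_2_to_3", r.2.2.1), ("hop_ge_min_deep", r.2.2.2)]

-- ===== PORT B =====
-- the body of B's aggregation loop: agg[h] = agg.get(h, 0) + c
def stepB (d : PySem.Dict Int Int) (p : String × Int) : PySem.Dict Int Int :=
  let h := toIntDefault p.1
  d.insert h (d.getD h 0 + p.2)

def bucketize_hops_py_alt (hop_histogram : List (String × Int)) (min_deep_hops : Int) :
    List (String × Int) :=
  let agg := hop_histogram.foldl stepB PySem.Dict.empty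
  [("hop_0", agg.getD 0 0),
   ("hop_1", agg.getD 1 0),
   ("hop_2_to_3", agg.getD 2 0 + agg.getD 3 0),
   ("hop_ge_min_deep",
     ((agg.items.filter (fun q => decide (min_deep_hops ≤ q.1))).map (fun q => q.2)).sum)]

-- ===== PRECONDITION & SPEC =====
def Spec_bucketize_hops_py (hop_histogram : List (String × Int)) (min_deep_hops : Int) (out : List (String × Int)) : Prop := out = bucketize_hops_py_alt hop_histogram min_deep_hops
instance (hop_histogram : List (String × Int)) (min_deep_hops : Int) (out : List (String × Int)) : Decidable (Spec_bucketize_hops_py hop_histogram min_deep_hops out) := by unfold Spec_bucketize_hops_py; infer_instance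

-- ===== CLAIM (what is proved, stated in full; the proofs are below) =====
def Claim_equal_bucketize_hops_py : Prop := ∀ (hop_histogram : List (String × Int)) (min_deep_hops : Int), Dom_bucketize_hops_py hop_histogram min_deep_hops → Spec_bucketize_hops_py hop_histogram min_deep_hops (bucketize_hops_py hop_histogram min_deep_hops)

-- ===== LEMMAS AND PROOFS =====

-- sum over the histogram of f applied to (parsed hop, count)
def selSum (f : Int → Int → Int) (l : List (String × Int)) : Int :=
  (l.map (fun q => f (toIntDefault q.1) q.2)).sum

theorem selSum_cons (f : Int → Int → Int) (q : String × Int) (l : List (String × Int)) :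
    selSum f (q :: l) = f (toIntDefault q.1) q.2 + selSum f l := by
  simp [selSum]

-- A's loop computes, in each component, the initial value plus a selected sum
theorem foldA_eq (m : Int) (l : List (String × Int)) :
    ∀ a b c d : Int, l.foldl (stepA m) (a, b, c, d) =
      (a + selSum (fun h c => if h = 0 then c else 0) l,
       b + selSum (fun h c => if h = 1 then c else 0) l,
       c + selSum (fun h c => if h = 0 then 0 else if h = 1 then 0 else
             if 2 ≤ h ∧ h ≤ 3 then c else 0) l,
       d + selSum (fun h c => if m ≤ h then c else 0) l) := by
  induction l with
  | nil => intro a b c d; simp [selSum]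
  | cons q t ih =>
    intro a b c d
    simp only [List.foldl_cons, selSum_cons, stepA]
    split_ifs <;> (rw [ih]; simp only [Prod.mk.injEq]; exact ⟨by omega, by omega, by omega, by omega⟩)

-- the aggregate's lookup at v is the sum of counts whose key parses to v
theorem getD_foldB (l : List (String × Int)) :
    ∀ (d : PySem.Dict Int Int) (v : Int),
      (l.foldl stepB d).getD v 0 = d.getD v 0 + selSum (fun h c => if h = v then c else 0) l := by
  induction l with
  | nil => intro d v; simp [selSum]
  | cons q t ih =>
    intro d v
    simp only [List.foldl_cons, selSum_cons, ih, stepB, PySem.Dict.getD_insert]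
    split_ifs with h1 h2 h2 <;> (simp_all; try omega)

def fsum (m : Int) (d : PySem.Dict Int Int) : Int :=
  ((d.items.filter (fun q => decide (m ≤ q.1))).map (fun q => q.2)).sum

-- replacing the unique item with key k by (k, w + c) changes the filtered sum by c when m ≤ k
theorem sum_replace (m k c : Int) :
    ∀ (its : List (Int × Int)) (w : Int), (its.map Prod.fst).Nodup → (k, w) ∈ its →
      (((its.map (fun p => if p.1 == k then (k, w + c) else p)).filter
          (fun q => decide (m ≤ q.1))).map (fun q => q.2)).sum
      = ((its.filter (fun q => decide (m ≤ q.1))).map (fun q => q.2)).sum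
        + (if m ≤ k then c else 0) := by
  intro its
  induction its with
  | nil => intro w _ hm; cases hm
  | cons p t ih =>
    intro w hnd hm
    rw [List.map_cons] at hnd
    have h1 := List.nodup_cons.mp hnd
    rcases List.mem_cons.mp hm with he | ht
    · subst he
      have hk : ∀ q ∈ t, ¬ (q.1 == k) = true := by
        intro q hq hb
        exact h1.1 (List.mem_map.mpr ⟨q, hq, by simpa using hb⟩)
      have hmap : t.map (fun p => if p.1 == k then (k, w + c) else p) = t := by
        rw [List.map_congr_left (g := fun p => p) (fun q hq => by simp [hk q hq]),
          List.map_id']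
      simp only [List.map_cons, beq_self_eq_true, if_true, hmap, List.filter_cons]
      split_ifs <;> (simp_all; try omega)
    · have hne : ¬ (p.1 == k) = true := by
        intro hb
        exact h1.1 (by
          rw [show p.1 = k from by simpa using hb]
          exact List.mem_map.mpr ⟨(k, w), ht, rfl⟩)
      simp only [List.map_cons, if_neg hne, List.filter_cons]
      have hih := ih w h1.2 ht
      generalize hz : (if m ≤ k then c else 0) = z at hih ⊢
      split_ifs with hp
      · simp only [List.map_cons, List.sum_cons, hih]; ring
      · exact hih

theorem fsum_insert (m k c : Int) (d : PySem.Dict Int Int) (hnd : d.keys.Nodup) :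
    fsum m (d.insert k (d.getD k 0 + c)) = fsum m d + (if m ≤ k then c else 0) := by
  by_cases hc : d.contains k = true
  · obtain ⟨w, hw⟩ : ∃ w, d.get? k = some w := by
      apply Option.isSome_iff_exists.mp
      rw [← PySem.Dict.contains_eq_isSome_get?]; exact hc
    have hmem : (k, w) ∈ d.items := PySem.Dict.mem_items_of_get?_eq_some d hw
    have hgd : d.getD k 0 = w := PySem.Dict.getD_of_get?_eq_some d 0 hw
    rw [fsum, PySem.Dict.items_insert_of_contains d _ hc, hgd]
    exact sum_replace m k c d.items w (by simpa [PySem.Dict.keys] using hnd) hmem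
  · rw [fsum, PySem.Dict.items_insert_of_not_contains d _ (by simpa using hc),
      PySem.Dict.getD_of_not_contains d 0 (by simpa using hc)]
    by_cases hmk : m ≤ k <;> simp [fsum, hmk]

-- the deep bucket read off the aggregate equals the selected sum over the histogram
theorem fsum_foldB (m : Int) (l : List (String × Int)) :
    ∀ (d : PySem.Dict Int Int), d.keys.Nodup →
      fsum m (l.foldl stepB d) = fsum m d + selSum (fun h c => if m ≤ h then c else 0) l := by
  induction l with
  | nil => intro d _; simp [selSum]
  | cons q t ih =>
    intro d hnd
    have hnod : (stepB d q).keys.Nodup :=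
      PySem.Dict.nodup_keys_insert d (toIntDefault q.1) _ hnd
    have hstep : fsum m (stepB d q) = fsum m d + (if m ≤ toIntDefault q.1 then q.2 else 0) :=
      fsum_insert m (toIntDefault q.1) q.2 d hnd
    simp only [List.foldl_cons, selSum_cons]
    rw [ih _ hnod, hstep]
    ring

theorem selSum_split23 (l : List (String × Int)) :
    selSum (fun h c => if h = 0 then 0 else if h = 1 then 0 else
        if 2 ≤ h ∧ h ≤ 3 then c else 0) l
    = selSum (fun h c => if h = 2 then c else 0) l + selSum (fun h c => if h = 3 then c else 0) l := by
  induction l with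
  | nil => simp [selSum]
  | cons q t ih =>
    simp only [selSum_cons, ih]
    split_ifs <;> omega

-- ===== VERDICT (by name: the statement is the Claim_ definition above) =====
theorem bucketize_hops_py_spec : Claim_equal_bucketize_hops_py := by
  intro hh m _
  unfold Spec_bucketize_hops_py bucketize_hops_py bucketize_hops_py_alt
  have hdeep := fsum_foldB m hh PySem.Dict.empty PySem.Dict.nodup_keys_empty
  have hempty : (PySem.Dict.empty : PySem.Dict Int Int).items = [] := rfl
  simp only [fsum, hempty] at hdeep
  simp [foldA_eq, getD_foldB, selSum_split23, hdeep, PySem.Dict.getD_empty]
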